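-- pv_equiv track=rewrite | github.com/nicholasterrazas/AOC_2023 | day04.py | get_copies
-- ===== SOURCE A (Python) =====
-- def parse_card(card: str):
--     card = card.strip()
--
--     colon = card.find(":") + 1
--     pipe = card.find("|") + 1
--
--     winners = card[colon:pipe].split(" ")
--     owned = card[pipe:].split(" ")
--
--     winners = [int(win) for win in winners if win.isdigit()]
--     owned = [int(own) for own in owned if own.isdigit()]
--
--     return winners, owned
--
-- def get_win_count(card: str):
--     winners, owned = parse_card(card)
--
--     win_count = 0
--     for num in owned:
--         if num in winners:
--             win_count += 1
--
--     return win_count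
--
-- def get_copies(pile: list[str]) -> str:
--     copies_won = {}      # key: card id, value: list of ids of cards that card id won
--     for card_id, card in enumerate(pile):
--         points = get_win_count(card)
--         if points > 0:
--             copies_won[card_id] = list(range(card_id+1, card_id+points+1))
--
--     copy_ids = list(range(len(pile)))
--     for card_id in range(len(pile)):
--         # scan through the copy ids:
--         # if we encounter the current card, retrieve the copies it won and add them
--         occurences = 0
--         for copy_id in copy_ids:
--             if copy_id == card_id:
--                 occurences += 1
--
--         additional_copies = copies_won.get(card_id, []) * occurences
--         copy_ids += additional_copies
--
--
--     copies = [pile[copy_id] for copy_id in copy_ids]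
--     return copies
-- ===== SOURCE B (Python) =====
-- def parse_card(card: str):
--     card = card.strip()
--     colon = card.find(":") + 1
--     pipe = card.find("|") + 1
--     winners = card[colon:pipe].split(" ")
--     owned = card[pipe:].split(" ")
--     winners = [int(win) for win in winners if win.isdigit()]
--     owned = [int(own) for own in owned if own.isdigit()]
--     return winners, owned
--
-- def get_win_count(card: str):
--     winners, owned = parse_card(card)
--     win_count = 0
--     for num in owned:
--         if num in winners:
--             win_count += 1
--     return win_count
--
-- def get_copies(pile):
--     n = len(pile)
--     wins = [get_win_count(card) for card in pile]
--     counts = [1] * n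
--     for i in range(n):
--         for j in range(i + 1, i + wins[i] + 1):
--             counts[j] += counts[i]
--     out = list(pile)
--     for i in range(n):
--         out += pile[i + 1 : i + wins[i] + 1] * counts[i]
--     return out
-- ===== Notes on version B (the rewrite author's own statement) =====
-- stated objective: faster
-- what changed: Replaces A's dict of won ranges plus a full rescan of the ever-growing copy_ids list per card (and its final id->card mapping) with a forward DP over a fixed-size counts array and direct emission of each card's won slice repeated counts[i] times.
import Mathlib
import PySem

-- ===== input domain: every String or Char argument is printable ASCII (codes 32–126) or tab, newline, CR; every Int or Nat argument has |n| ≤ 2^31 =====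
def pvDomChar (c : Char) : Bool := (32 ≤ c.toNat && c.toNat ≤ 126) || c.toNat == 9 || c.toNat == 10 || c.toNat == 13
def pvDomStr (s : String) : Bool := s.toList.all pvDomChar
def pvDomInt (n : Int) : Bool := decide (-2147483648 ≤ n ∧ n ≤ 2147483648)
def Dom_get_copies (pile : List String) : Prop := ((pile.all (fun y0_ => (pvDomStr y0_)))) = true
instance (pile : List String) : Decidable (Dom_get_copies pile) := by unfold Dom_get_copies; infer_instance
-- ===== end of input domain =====

-- B replaces A's per-card rescan of the growing copy_ids list by a forward DP over a counts
-- array and direct emission of each won slice; return values agree on all of Pre_.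

-- ===== PORT A =====
-- parse_card: int(w) is only taken on w.isdigit() strings, where ofChars? is always some,
-- so the guarded filterMap is exact.
def parseCard (card : String) : List Int × List Int :=
  let cs := PySem.Chars.strip card.toList
  let colon := PySem.Chars.find cs [':'] + 1
  let pipe := PySem.Chars.find cs ['|'] + 1
  let winners0 := PySem.Chars.splitOn (PySem.List.slice cs (some colon) (some pipe)) [' ']
  let owned0 := PySem.Chars.splitOn (PySem.List.slice cs (some pipe) none) [' ']
  (winners0.filterMap (fun w => if PySem.Chars.strIsdigit w then PySem.Int.ofChars? w else none),
   owned0.filterMap (fun w => if PySem.Chars.strIsdigit w then PySem.Int.ofChars? w else none))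

def getWinCount (card : String) : Int :=
  let wo := parseCard card
  wo.2.foldl (fun acc num => if num ∈ wo.1 then acc + 1 else acc) 0

def get_copies (pile : List String) : List String :=
  let copiesWon : PySem.Dict Int (List Int) :=
    (PySem.List.enumerate pile 0).foldl (fun d p =>
      let points := getWinCount p.2
      if 0 < points then d.insert p.1 (PySem.List.pyRange (p.1 + 1) (p.1 + points + 1) 1) else d)
      PySem.Dict.empty
  let n : Int := pile.length
  let copyIds :=
    (PySem.List.pyRange 0 n 1).foldl (fun ids cardId =>
      let occ := ids.foldl (fun o cid => if cid == cardId then o + 1 else o) (0 : Int)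
      ids ++ PySem.List.pyRepeat (copiesWon.getD cardId []) occ)
      (PySem.List.pyRange 0 n 1)
  -- pile[copy_id]: IndexError (= none) exactly outside Pre_; inside Pre_ every id is in
  -- range, so the default "" is never read.
  copyIds.map (fun cid => PySem.List.pyGetD pile cid "")

-- ===== PORT B =====
-- Source B's parse_card / get_win_count are the same module helpers; the port shares them.
def get_copies_alt (pile : List String) : List String :=
  let n : Int := pile.length
  let wins : List Int := pile.map getWinCount
  let counts :=
    (PySem.List.pyRange 0 n 1).foldl (fun cnts i =>
      (PySem.List.pyRange (i + 1) (i + PySem.List.pyGetD wins i 0 + 1) 1).foldl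
        (fun c j =>
          -- counts[j] += counts[i]: IndexError exactly outside Pre_; inside Pre_ j < n,
          -- so set/pyGetD are exact.
          c.set j.toNat (PySem.List.pyGetD c j 0 + PySem.List.pyGetD c i 0)) cnts)
      (PySem.List.pyRepeat [1] n)
  (PySem.List.pyRange 0 n 1).foldl (fun out i =>
      out ++ PySem.List.pyRepeat
        (PySem.List.slice pile (some (i + 1)) (some (i + PySem.List.pyGetD wins i 0 + 1)))
        (PySem.List.pyGetD counts i 0))
    pile

-- ===== PRECONDITION & SPEC =====
-- Pre_ excludes exactly the piles on which A raises IndexError: some card wins copies of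
-- cards past the end of the pile (then pile[copy_id] in A, and counts[j] in B, are out of range).
def Pre_get_copies (pile : List String) : Prop :=
  ∀ p ∈ PySem.List.enumerate pile 0, p.1 + getWinCount p.2 < (pile.length : Int)
instance (pile : List String) : Decidable (Pre_get_copies pile) := by
  unfold Pre_get_copies; infer_instance

def pvWitness_get_copies : List String := ["Card 1: 1 | 1", "x"]

def Spec_get_copies (pile : List String) (out : List String) : Prop := out = get_copies_alt pile
instance (pile : List String) (out : List String) : Decidable (Spec_get_copies pile out) := by
  unfold Spec_get_copies; infer_instance

-- ===== CLAIM (what is proved, stated in full; the proofs are below) =====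
def Claim_equal_get_copies : Prop := ∀ (pile : List String), Dom_get_copies pile → Pre_get_copies pile → Spec_get_copies pile (get_copies pile)


-- ===== LEMMAS AND PROOFS =====

-- proof-only abbreviations for the quantities both programs compute
def pvW (pile : List String) (j : Nat) : Int := (pile.map getWinCount).getD j 0

-- the ids of the cards card j wins (A's dict entry; empty when the win count is 0)
def pvWon (pile : List String) (j : Nat) : List Int :=
  PySem.List.pyRange ((j : Int) + 1) ((j : Int) + pvW pile j + 1)

-- the final number of copies of card i (the common value both loops compute)
def pvOcc (pile : List String) : Nat → Int
  | i => 1 + (((List.range i).attach.map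
      (fun j => if ((i : Nat) : Int) ∈ pvWon pile j.1 then pvOcc pile j.1 else 0)).sum)
  termination_by i => i
  decreasing_by exact List.mem_range.mp j.2

def pvR0 (pile : List String) : List Int := (List.range pile.length).map (fun k : Nat => (k : Int))

def pvBlocksA (pile : List String) (k : Nat) : List Int :=
  (List.range k).flatMap (fun j => PySem.List.pyRepeat (pvWon pile j) (pvOcc pile j))

lemma pyRange_one_eq_map (a b : Int) :
    PySem.List.pyRange a b = List.map (fun k : Nat => a + (k : Int)) (List.range (b - a).toNat) := by
  rw [PySem.List.pyRange_of_pos a b one_pos]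
  rcases lt_or_ge a b with h | h
  · rw [if_pos h]; simp only [one_mul, add_sub_cancel_right, Int.ediv_one]
  · rw [if_neg (not_lt.mpr h), Int.toNat_of_nonpos (by omega)]; simp

lemma getWinCount_nonneg (card : String) : 0 ≤ getWinCount card := by
  unfold getWinCount
  rw [PySem.List.foldl_ite_add_one (fun num => num ∈ (parseCard card).1)]
  positivity

lemma pvW_nonneg (pile : List String) (j : Nat) : 0 ≤ pvW pile j := by
  unfold pvW
  rw [List.getD_eq_getElem?_getD, List.getElem?_map]
  rcases h : pile[j]? with _ | c
  · simp
  · simpa using getWinCount_nonneg c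

lemma pvW_at (pile : List String) (j : Nat) (h : j < pile.length) :
    pvW pile j = getWinCount pile[j] := by
  unfold pvW
  rw [List.getD_eq_getElem?_getD, List.getElem?_map, List.getElem?_eq_getElem h]
  rfl

lemma mem_pvWon (pile : List String) (j : Nat) (x : Int) :
    x ∈ pvWon pile j ↔ (j : Int) < x ∧ x < (j : Int) + pvW pile j + 1 := by
  unfold pvWon
  rw [PySem.List.mem_pyRange_one]
  omega

lemma nodup_pvWon (pile : List String) (j : Nat) : (pvWon pile j).Nodup := by
  unfold pvWon
  rw [pyRange_one_eq_map]
  exact (List.nodup_range).map (fun p q hpq => by omega)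

lemma pvOcc_eq (pile : List String) (i : Nat) :
    pvOcc pile i = 1 + ((List.range i).map
      (fun j => if (i : Int) ∈ pvWon pile j then pvOcc pile j else 0)).sum := by
  rw [pvOcc]
  simp [List.map_subtype, List.unattach_attach]

lemma pvOcc_pos (pile : List String) (i : Nat) : 1 ≤ pvOcc pile i := by
  induction i using Nat.strong_induction_on with
  | _ i ih =>
    rw [pvOcc_eq]
    have : 0 ≤ ((List.range i).map
        (fun j => if (i : Int) ∈ pvWon pile j then pvOcc pile j else 0)).sum := by
      apply List.sum_nonneg
      intro x hx
      rcases List.mem_map.mp hx with ⟨j, hj, rfl⟩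
      split
      · exact le_trans one_pos.le (ih j (List.mem_range.mp hj))
      · exact le_refl 0
    omega

lemma pre' (pile : List String) (hpre : Pre_get_copies pile) :
    ∀ j : Nat, j < pile.length → (j : Int) + pvW pile j < pile.length := by
  intro j hj
  rw [pvW_at pile j hj]
  have := hpre ((j : Int), pile[j])
    (by rw [PySem.List.mem_enumerate_iff]; exact ⟨j, hj, by simp⟩)
  simpa using this

-- ---- A's dict of won ranges ----

abbrev pvDStep : PySem.Dict Int (List Int) → Int × String → PySem.Dict Int (List Int) :=
  fun d p =>
    let points := getWinCount p.2
    if 0 < points then d.insert p.1 (PySem.List.pyRange (p.1 + 1) (p.1 + points + 1)) else d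

lemma dfold_lt (xs : List String) (s : Int) (d : PySem.Dict Int (List Int)) (key : Int)
    (h : key < s) :
    ((PySem.List.enumerate xs s).foldl pvDStep d).getD key [] = d.getD key [] := by
  induction xs generalizing s d with
  | nil => simp [PySem.List.enumerate]
  | cons x t ih =>
    rw [PySem.List.enumerate_cons, List.foldl_cons]
    rw [ih (s + 1) _ (by omega)]
    change (if 0 < getWinCount x then
        d.insert s (PySem.List.pyRange (s + 1) (s + getWinCount x + 1)) else d).getD key [] =
      d.getD key []
    split
    · rw [PySem.Dict.getD_insert, if_neg (by omega)]
    · rfl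

lemma dfold_at (xs : List String) (s : Int) (d : PySem.Dict Int (List Int)) (k : Nat)
    (hk : k < xs.length) :
    ((PySem.List.enumerate xs s).foldl pvDStep d).getD (s + k) [] =
      if 0 < getWinCount (xs[k]'hk) then
        PySem.List.pyRange (s + k + 1) (s + k + getWinCount (xs[k]'hk) + 1)
      else d.getD (s + k) [] := by
  induction xs generalizing s d k with
  | nil => simp at hk
  | cons x t ih =>
    rw [PySem.List.enumerate_cons, List.foldl_cons]
    cases k with
    | zero =>
      rw [dfold_lt t (s + 1) (pvDStep d (s, x)) (s + ((0 : Nat) : Int)) (by push_cast; omega)]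
      change (if 0 < getWinCount x then
          d.insert s (PySem.List.pyRange (s + 1) (s + getWinCount x + 1)) else d).getD
          (s + ((0 : Nat) : Int)) [] = _
      simp only [Nat.cast_zero, add_zero, List.getElem_cons_zero]
      split
      · rw [PySem.Dict.getD_insert, if_pos rfl]
      · rfl
    | succ k =>
      have hk' : k < t.length := by simpa using hk
      have harg : s + (((k : Nat) + 1 : Nat) : Int) = (s + 1) + (k : Int) := by push_cast; omega
      rw [harg, ih (s + 1) (pvDStep d (s, x)) k hk']
      simp only [List.getElem_cons_succ]
      split
      · rfl
      · change (if 0 < getWinCount x then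
            d.insert s (PySem.List.pyRange (s + 1) (s + getWinCount x + 1)) else d).getD
            ((s + 1) + (k : Int)) [] = _
        rw [← harg]
        split
        · rw [PySem.Dict.getD_insert, if_neg (by push_cast; omega)]
        · rfl

lemma dictA (pile : List String) (k : Nat) (hk : k < pile.length) :
    ((PySem.List.enumerate pile 0).foldl pvDStep PySem.Dict.empty).getD ((k : Nat) : Int) [] =
      pvWon pile k := by
  have h0 : ((k : Nat) : Int) = 0 + (k : Int) := by omega
  rw [h0, dfold_at pile 0 PySem.Dict.empty k hk]
  unfold pvWon
  rw [pvW_at pile k hk]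
  split
  · congr 1 <;> ring
  · have hz : getWinCount (pile[k]'hk) = 0 :=
      le_antisymm (not_lt.mp (by assumption)) (getWinCount_nonneg _)
    rw [PySem.Dict.getD_empty, hz, PySem.List.pyRange_one_eq_nil (by omega)]

-- ---- counting occurrences in A's growing list ----

lemma count_pyRepeat (xs : List Int) (m : Int) (v : Int) :
    (PySem.List.pyRepeat xs m).count v = m.toNat * xs.count v := by
  simp [PySem.List.pyRepeat, List.count_flatten, List.map_replicate, List.sum_replicate,
    smul_eq_mul]

lemma count_pvWon (pile : List String) (j : Nat) (x : Int) :
    (pvWon pile j).count x = if x ∈ pvWon pile j then 1 else 0 := by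
  split
  · exact List.count_eq_one_of_mem (nodup_pvWon pile j) (by assumption)
  · exact List.count_eq_zero_of_not_mem (by assumption)

lemma count_pvR0 (pile : List String) (k : Nat) (hk : k < pile.length) :
    (pvR0 pile).count ((k : Nat) : Int) = 1 := by
  unfold pvR0
  rw [List.count_map_of_injective _ _ (fun p q h => by omega) k]
  exact List.count_eq_one_of_mem List.nodup_range (List.mem_range.mpr hk)

lemma countA (pile : List String) (k : Nat) (hk : k < pile.length) :
    (((pvR0 pile ++ pvBlocksA pile k).count ((k : Nat) : Int) : Nat) : Int) = pvOcc pile k := by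
  have hterm : ∀ j ∈ List.range k,
      ((List.count ((k : Nat) : Int) (PySem.List.pyRepeat (pvWon pile j) (pvOcc pile j)) : Nat) : Int)
        = (if ((k : Nat) : Int) ∈ pvWon pile j then pvOcc pile j else 0) := by
    intro j hj
    rw [count_pyRepeat, count_pvWon]
    split
    · push_cast
      rw [Int.toNat_of_nonneg (le_trans one_pos.le (pvOcc_pos pile j))]
      ring
    · simp
  rw [List.count_append, count_pvR0 pile k hk]
  unfold pvBlocksA
  rw [List.count_flatMap, pvOcc_eq pile k]
  push_cast [Nat.cast_list_sum, List.map_map]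
  congr 1
  exact congrArg List.sum (List.map_congr_left (fun j hj => by simpa using hterm j hj))

-- ---- A's main loop ----

lemma Aloop (pile : List String) (k : Nat) (hk : k ≤ pile.length) :
    (List.range k).foldl (fun ids kk => ids ++
        PySem.List.pyRepeat
          (((PySem.List.enumerate pile 0).foldl pvDStep PySem.Dict.empty).getD ((kk : Nat) : Int) [])
          (ids.foldl (fun o cid => if cid == ((kk : Nat) : Int) then o + 1 else o) 0))
      (pvR0 pile) = pvR0 pile ++ pvBlocksA pile k := by
  induction k with
  | zero => simp [pvBlocksA]
  | succ k ih =>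
    rw [List.range_succ, List.foldl_append, ih (by omega), List.foldl_cons, List.foldl_nil]
    rw [PySem.List.foldl_beq_add_one, dictA pile k (by omega), countA pile k (by omega)]
    unfold pvBlocksA
    rw [List.range_succ, List.flatMap_append]
    simp [List.append_assoc]

lemma Aresult (pile : List String) :
    get_copies pile =
      (pvR0 pile ++ pvBlocksA pile pile.length).map (fun cid => PySem.List.pyGetD pile cid "") := by
  simp only [get_copies]
  rw [PySem.List.pyRange_zero_natCast, List.foldl_map]
  rw [show List.map (fun k : Nat => (k : Int)) (List.range pile.length) = pvR0 pile from rfl]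
  rw [Aloop pile pile.length le_rfl]

-- ---- B's counts array ----

lemma inner_fold (k : Nat) (L : List Int) (c : List Int) (hnd : L.Nodup)
    (hL : ∀ j ∈ L, ((k : Nat) : Int) < j ∧ j < (c.length : Int)) :
    (L.foldl (fun c j => c.set j.toNat
        (PySem.List.pyGetD c j 0 + PySem.List.pyGetD c ((k : Nat) : Int) 0)) c).length = c.length ∧
    ∀ p : Nat, (L.foldl (fun c j => c.set j.toNat
        (PySem.List.pyGetD c j 0 + PySem.List.pyGetD c ((k : Nat) : Int) 0)) c).getD p 0 =
      c.getD p 0 + (if ((p : Nat) : Int) ∈ L then c.getD k 0 else 0) := by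
  induction L generalizing c with
  | nil => exact ⟨rfl, fun p => by simp⟩
  | cons j t ih =>
    obtain ⟨hkj, hjlen⟩ := hL j (List.mem_cons_self)
    have hj0 : (0 : Int) ≤ j := by omega
    obtain ⟨hjt, hndt⟩ := List.nodup_cons.mp hnd
    rw [List.foldl_cons]
    set c' := c.set j.toNat (PySem.List.pyGetD c j 0 + PySem.List.pyGetD c ((k : Nat) : Int) 0)
      with hc'
    have hlen' : c'.length = c.length := List.length_set
    obtain ⟨ih1, ih2⟩ := ih c' hndt (fun j' hj' =>
      ⟨(hL j' (List.mem_cons_of_mem j hj')).1, by rw [hlen']; exact (hL j' (List.mem_cons_of_mem j hj')).2⟩)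
    refine ⟨ih1.trans hlen', fun p => ?_⟩
    rw [ih2 p]
    have hck : c'.getD k 0 = c.getD k 0 := by
      rw [hc', List.getD_eq_getElem?_getD, List.getD_eq_getElem?_getD,
        List.getElem?_set_ne (by omega : j.toNat ≠ k)]
    by_cases hpj : ((p : Nat) : Int) = j
    · have hpn : p = j.toNat := by omega
      have hplen : p < c.length := by omega
      have hc'p : c'.getD p 0 = c.getD p 0 + c.getD k 0 := by
        rw [hc', List.getD_eq_getElem?_getD, hpn, List.getElem?_set_self (by omega),
          Option.getD_some, PySem.List.pyGetD_of_nonneg c 0 hj0,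
          PySem.List.pyGetD_natCast, List.getD_eq_getElem?_getD]
      have hpt : ((p : Nat) : Int) ∉ t := by rw [hpj]; exact hjt
      rw [hc'p, hck, if_neg hpt, if_pos (by rw [hpj]; exact List.mem_cons_self)]
      ring
    · have hc'p : c'.getD p 0 = c.getD p 0 := by
        rw [hc', List.getD_eq_getElem?_getD, List.getD_eq_getElem?_getD,
          List.getElem?_set_ne (by omega : j.toNat ≠ p)]
      rw [hc'p, hck]
      simp [List.mem_cons, hpj]

lemma sum_trunc (f : Nat → Int) (i N : Nat) (h : i ≤ N) (h0 : ∀ j, i ≤ j → f j = 0) :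
    ((List.range N).map f).sum = ((List.range i).map f).sum := by
  induction N, h using Nat.le_induction with
  | base => rfl
  | succ N hN ih => rw [List.range_succ, List.map_append, List.sum_append, ih]; simp [h0 N hN]

lemma occ_from_sum (pile : List String) (i k : Nat) (hik : i ≤ k) :
    1 + ((List.range k).map
        (fun j => if ((i : Nat) : Int) ∈ pvWon pile j then pvOcc pile j else 0)).sum =
      pvOcc pile i := by
  rw [sum_trunc _ i k hik, ← pvOcc_eq]
  intro j hj
  rw [if_neg]
  intro hmem
  have := (mem_pvWon pile j _).mp hmem
  omega

abbrev pvBStep (pile : List String) : List Int → Nat → List Int := fun cnts i =>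
  (PySem.List.pyRange (((i : Nat) : Int) + 1)
      (((i : Nat) : Int) + PySem.List.pyGetD (pile.map getWinCount) ((i : Nat) : Int) 0 + 1)).foldl
    (fun c j => c.set j.toNat
      (PySem.List.pyGetD c j 0 + PySem.List.pyGetD c ((i : Nat) : Int) 0)) cnts

lemma Bloop (pile : List String) (hpre : Pre_get_copies pile) (k : Nat) (hk : k ≤ pile.length) :
    ((List.range k).foldl (pvBStep pile) (List.replicate pile.length 1)).length = pile.length ∧
    ∀ p : Nat, p < pile.length →
      ((List.range k).foldl (pvBStep pile) (List.replicate pile.length 1)).getD p 0 =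
      1 + ((List.range k).map
        (fun i => if ((p : Nat) : Int) ∈ pvWon pile i then pvOcc pile i else 0)).sum := by
  induction k with
  | zero =>
    refine ⟨List.length_replicate, fun p hp => ?_⟩
    simp [List.getD_eq_getElem?_getD, hp]
  | succ k ih =>
    obtain ⟨ihlen, ihget⟩ := ih (by omega)
    simp only [List.range_succ, List.foldl_append, List.foldl_cons, List.foldl_nil]
    set c := (List.range k).foldl (pvBStep pile) (List.replicate pile.length 1) with hcdef
    have hlist : PySem.List.pyRange (((k : Nat) : Int) + 1)
        (((k : Nat) : Int) + PySem.List.pyGetD (pile.map getWinCount) ((k : Nat) : Int) 0 + 1) =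
        pvWon pile k := by
      rw [PySem.List.pyGetD_natCast]; rfl
    show (pvBStep pile c k).length = pile.length ∧ _
    unfold pvBStep
    rw [hlist]
    obtain ⟨in1, in2⟩ := inner_fold k (pvWon pile k) c (nodup_pvWon pile k)
      (fun j hj => by
        have hm := (mem_pvWon pile k j).mp hj
        have := pre' pile hpre k (by omega)
        rw [ihlen]
        omega)
    refine ⟨in1.trans ihlen, fun p hp => ?_⟩
    rw [in2 p, ihget p hp, List.map_append, List.sum_append,
      ihget k (by omega), occ_from_sum pile k k le_rfl]
    simp only [List.map_cons, List.map_nil, List.sum_cons, List.sum_nil]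
    ring

lemma Bresult (pile : List String) (hpre : Pre_get_copies pile) :
    get_copies_alt pile = pile ++ (List.range pile.length).flatMap (fun i : Nat =>
      PySem.List.pyRepeat
        (PySem.List.slice pile (some ((i : Int) + 1)) (some ((i : Int) + pvW pile i + 1)))
        (pvOcc pile i)) := by
  simp only [get_copies_alt]
  rw [PySem.List.pyRepeat_singleton]
  simp only [PySem.List.pyRange_zero_natCast, List.foldl_map, Int.toNat_natCast]
  rw [PySem.List.foldl_congr_mem _ _
      (fun out (i : Nat) => out ++ PySem.List.pyRepeat
        (PySem.List.slice pile (some (((i : Nat) : Int) + 1))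
          (some (((i : Nat) : Int) + pvW pile i + 1)))
        (pvOcc pile i)) _ ?_]
  · rw [PySem.List.foldl_append_eq_flatMap]
  · intro acc i hi
    have hiN : i < pile.length := List.mem_range.mp hi
    obtain ⟨hclen, hcget⟩ := Bloop pile hpre pile.length le_rfl
    rw [PySem.List.pyGetD_natCast (pile.map getWinCount) i,
      PySem.List.pyGetD_natCast _ i, hcget i hiN, occ_from_sum pile i pile.length hiN.le]
    rfl

-- ---- assembling the two results ----

lemma map_pyRepeat (xs : List Int) (m : Int) (f : Int → String) :
    (PySem.List.pyRepeat xs m).map f = PySem.List.pyRepeat (xs.map f) m := by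
  simp [PySem.List.pyRepeat, List.map_flatten, List.map_replicate]

lemma block_eq (pile : List String) (hpre : Pre_get_copies pile) (j : Nat) (hj : j < pile.length) :
    (pvWon pile j).map (fun cid => PySem.List.pyGetD pile cid "") =
      PySem.List.slice pile (some ((j : Int) + 1)) (some ((j : Int) + pvW pile j + 1)) := by
  have hw0 := pvW_nonneg pile j
  have hlt := pre' pile hpre j hj
  set w := (pvW pile j).toNat with hw
  have hend : ((j : Int) + pvW pile j + 1) = ((j + 1 + w : Nat) : Int) := by push_cast; omega
  have hstart : ((j : Int) + 1) = ((j + 1 : Nat) : Int) := by push_cast; ring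
  rw [hstart, hend, PySem.List.slice_natCast, show j + 1 + w - (j + 1) = w from by omega]
  unfold pvWon
  rw [pyRange_one_eq_map, show (((j : Int) + pvW pile j + 1) - ((j : Int) + 1)).toNat = w from by
    omega, List.map_map]
  apply List.ext_getElem
  · simp
    omega
  · intro idx h1 h2
    simp only [List.getElem_map, List.getElem_range, Function.comp]
    rw [show ((j : Int) + 1 + (idx : Int)) = ((j + 1 + idx : Nat) : Int) from by push_cast; ring,
      PySem.List.pyGetD_natCast, List.getD_eq_getElem?_getD,
      List.getElem?_eq_getElem (by simp at h2; omega), Option.getD_some,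
      List.getElem_take, List.getElem_drop]

-- ===== VERDICT (by name: the statement is the Claim_ definition above) =====
theorem get_copies_spec : Claim_equal_get_copies := by
  intro pile hdom hpre
  unfold Spec_get_copies
  rw [Aresult pile, Bresult pile hpre, List.map_append]
  congr 1
  · calc (pvR0 pile).map (fun cid => PySem.List.pyGetD pile cid "")
        = (PySem.List.pyRange 0 (pile.length : Int)).map
            (fun cid => PySem.List.pyGetD pile cid "") := by
          rw [PySem.List.pyRange_zero_natCast]; rfl
      _ = pile := PySem.List.map_pyGetD_pyRange_zero' pile ""
  · unfold pvBlocksA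
    rw [List.map_flatMap]
    rw [List.flatMap_def, List.flatMap_def]
    refine congrArg List.flatten (List.map_congr_left fun j hj => ?_)
    have hjN : j < pile.length := List.mem_range.mp hj
    rw [map_pyRepeat, block_eq pile hpre j hjN]
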